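-- pv_equiv track=rewrite | github.com/spenpal/advent-of-code | src/2024/d07.py | part1
-- ===== SOURCE A (Python) =====
-- from collections import deque
--
-- def part1(equations: list[tuple[tuple[int, ...], int]]) -> int:
--     total = 0
--
--     for nums, target in equations:
--         queue = deque([(nums[0], nums[1:])])
--         while queue:
--             res, remainder_nums = queue.popleft()
--             if not remainder_nums:
--                 if res == target:
--                     total += target
--                     break
--                 continue
--
--             next_num = remainder_nums[0]
--             add, mul = res + next_num, res * next_num
--
--             if add <= target:
--                 queue.append((add, remainder_nums[1:]))
--             if mul <= target:
--                 queue.append((mul, remainder_nums[1:]))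
--
--     return total
-- ===== SOURCE B (Python) =====
-- def part1(equations):
--     def reachable(acc, rest, target):
--         if not rest:
--             return acc == target
--         n = rest[0]
--         tail = rest[1:]
--         return (acc + n <= target and reachable(acc + n, tail, target)) \
--             or (acc * n <= target and reachable(acc * n, tail, target))
--
--     return sum(target for nums, target in equations
--                if reachable(nums[0], list(nums[1:]), target))
-- ===== Notes on version B (the rewrite author's own statement) =====
-- stated objective: alternative
-- what changed: Replaced the explicit FIFO-deque breadth-first search over (partial result, remaining numbers) states with a short-circuiting recursive depth-first reachability test per equation, summed by a generator expression.
import Mathlib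
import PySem

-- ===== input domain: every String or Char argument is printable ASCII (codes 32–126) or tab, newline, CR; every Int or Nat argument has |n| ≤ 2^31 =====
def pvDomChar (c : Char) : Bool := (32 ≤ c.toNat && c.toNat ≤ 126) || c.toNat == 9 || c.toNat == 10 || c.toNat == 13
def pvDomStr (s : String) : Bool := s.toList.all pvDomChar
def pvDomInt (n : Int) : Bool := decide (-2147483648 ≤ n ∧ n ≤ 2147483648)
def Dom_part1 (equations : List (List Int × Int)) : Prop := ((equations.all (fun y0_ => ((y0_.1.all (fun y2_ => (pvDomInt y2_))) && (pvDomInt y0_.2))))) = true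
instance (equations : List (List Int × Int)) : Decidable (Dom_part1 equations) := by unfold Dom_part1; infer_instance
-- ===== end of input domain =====

-- B replaces A's explicit FIFO-queue breadth-first search with a recursive
-- depth-first reachability test per equation (alternative decomposition, same pruning).
-- Neither version mutates its input.

-- ===== PORT A =====
-- weight of a queue, used only for termination of the BFS loop
def pvQW (q : List (Int × List Int)) : Nat := (q.map (fun p => 3 ^ p.2.length)).sum

-- termination fact cited by `bfsAny`'s decreasing_by
theorem pvQW_step (target res n : Int) (rest : List Int) (qs : List (Int × List Int)) :
    pvQW (if res * n ≤ target then
            (if res + n ≤ target then qs ++ [(res + n, rest)] else qs) ++ [(res * n, rest)]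
          else (if res + n ≤ target then qs ++ [(res + n, rest)] else qs))
      < pvQW ((res, n :: rest) :: qs) := by
  have h3 : 0 < 3 ^ rest.length := pow_pos (by norm_num) _
  split_ifs <;>
    simp only [pvQW, List.map_append, List.sum_append, List.map_cons, List.sum_cons,
      List.map_nil, List.sum_nil, List.length_cons, pow_succ] <;> omega

-- the `while queue:` loop of A: popleft from the head, append at the tail;
-- returns true exactly when A's loop executes `total += target; break`.
def bfsAny (target : Int) (q : List (Int × List Int)) : Bool :=
  match q with
  | [] => false
  | (res, rem) :: qs =>
    match rem with
    | [] => if res = target then true else bfsAny target qs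
    | n :: rest =>
      let q1 := if res + n ≤ target then qs ++ [(res + n, rest)] else qs
      let q2 := if res * n ≤ target then q1 ++ [(res * n, rest)] else q1
      bfsAny target q2
termination_by pvQW q
decreasing_by
  · simp only [pvQW, List.map_cons, List.sum_cons, List.length_nil, pow_zero]
    omega
  · exact pvQW_step target res n rest qs

-- body of A's `for nums, target in equations:` loop
def stepA (total : Int) (p : List Int × Int) : Int :=
  match p.1 with
  | [] => total            -- Python raises IndexError on nums[0]; excluded by Pre_part1
  | n0 :: rest => if bfsAny p.2 [(n0, rest)] then total + p.2 else total

def part1 (equations : List (List Int × Int)) : Int :=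
  equations.foldl stepA 0

-- ===== PORT B =====
-- the recursive helper `reachable` of Source B
def reachable (acc : Int) (rest : List Int) (target : Int) : Bool :=
  match rest with
  | [] => acc = target
  | n :: tail =>
    (decide (acc + n ≤ target) && reachable (acc + n) tail target)
      || (decide (acc * n ≤ target) && reachable (acc * n) tail target)

-- the generator's filter condition of Source B
def okB (p : List Int × Int) : Bool :=
  match p.1 with
  | [] => false            -- Python raises IndexError on nums[0]; excluded by Pre_part1
  | n0 :: rest => reachable n0 rest p.2

def part1_alt (equations : List (List Int × Int)) : Int :=
  (equations.filter okB).foldl (fun s p => s + p.2) 0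

-- ===== PRECONDITION & SPEC =====
-- Pre_ excludes equations with an empty number list, on which both Pythons raise IndexError.
def Pre_part1 (equations : List (List Int × Int)) : Prop :=
  ∀ p ∈ equations, p.1 ≠ []
instance (equations : List (List Int × Int)) : Decidable (Pre_part1 equations) := by unfold Pre_part1; infer_instance

def pvWitness_part1 : (List (List Int × Int)) := [([2, 3], 6), ([1, 2, 3], 9)]

def Spec_part1 (equations : List (List Int × Int)) (out : Int) : Prop := out = part1_alt equations
instance (equations : List (List Int × Int)) (out : Int) : Decidable (Spec_part1 equations out) := by unfold Spec_part1; infer_instance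

-- ===== CLAIM (what is proved, stated in full; the proofs are below) =====
def Claim_equal_part1 : Prop := ∀ (equations : List (List Int × Int)), Dom_part1 equations → Pre_part1 equations → Spec_part1 equations (part1 equations)

-- ===== LEMMAS AND PROOFS =====

-- BFS from a queue succeeds iff some queue entry is DFS-reachable
theorem bfsAny_any (target : Int) :
    ∀ (m : Nat) (q : List (Int × List Int)), pvQW q ≤ m →
      bfsAny target q = q.any (fun p => reachable p.1 p.2 target) := by
  intro m
  induction m with
  | zero =>
    intro q hq
    cases q with
    | nil => simp [bfsAny]
    | cons p qs =>
      exfalso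
      have h3 : 0 < 3 ^ p.2.length := pow_pos (by norm_num) _
      simp only [pvQW, List.map_cons, List.sum_cons] at hq
      omega
  | succ m ih =>
    intro q hq
    match q with
    | [] => simp [bfsAny]
    | (res, []) :: qs =>
      have hqs : pvQW qs ≤ m := by
        simp only [pvQW, List.map_cons, List.sum_cons, List.length_nil, pow_zero] at hq
        simpa [pvQW] using Nat.le_of_succ_le_succ (by omega)
      by_cases h : res = target
      · simp [bfsAny, h, reachable]
      · simp [bfsAny, h, reachable, ih qs hqs]
    | (res, n :: rest) :: qs =>
      have hlt := pvQW_step target res n rest qs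
      rw [bfsAny]
      rw [ih _ (by omega)]
      simp only [List.any_cons, reachable]
      split_ifs with h1 h2 h3 <;>
        simp [List.any_append, *] <;>
        cases hqs : qs.any (fun p => reachable p.1 p.2 target) <;>
        cases hadd : reachable (res + n) rest target <;>
        cases hmul : reachable (res * n) rest target <;> simp_all

theorem bfsAny_singleton (target n0 : Int) (rest : List Int) :
    bfsAny target [(n0, rest)] = reachable n0 rest target := by
  simpa using bfsAny_any target (pvQW [(n0, rest)]) [(n0, rest)] le_rfl

theorem stepA_eq (total : Int) (p : List Int × Int) :
    stepA total p = if okB p then total + p.2 else total := by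
  rcases p with ⟨nums, t⟩
  cases nums with
  | nil => simp [stepA, okB]
  | cons n0 rest => simp [stepA, okB, bfsAny_singleton]

theorem foldl_sum_shift (l : List (List Int × Int)) (a : Int) :
    l.foldl (fun s p => s + p.2) a = a + l.foldl (fun s p => s + p.2) 0 := by
  induction l generalizing a with
  | nil => simp
  | cons p l ihm =>
    rw [List.foldl_cons, List.foldl_cons, ihm, ihm (0 + p.2)]
    ring

theorem foldl_part1_eq (l : List (List Int × Int)) (acc : Int) :
    l.foldl stepA acc = acc + (l.filter okB).foldl (fun s p => s + p.2) 0 := by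
  induction l generalizing acc with
  | nil => simp
  | cons p l ih =>
    rw [List.foldl_cons, List.filter_cons, stepA_eq]
    by_cases h : okB p
    · rw [if_pos h, if_pos h, ih, List.foldl_cons,
        foldl_sum_shift (List.filter okB l) (0 + p.2)]
      ring
    · rw [if_neg h, if_neg (by simpa using h), ih]

-- ===== VERDICT (by name: the statement is the Claim_ definition above) =====
theorem part1_spec : Claim_equal_part1 := by
  intro equations _ _
  unfold Spec_part1 part1 part1_alt
  simpa using foldl_part1_eq equations 0
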